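-- pv_equiv track=rewrite | github.com/abelmul/competitive | leetcode/find-the-difference-of-two-arrays.py | findDifference
-- ===== SOURCE A (Python) =====
-- from typing import List
--
-- def findDifference(nums1: List[int], nums2: List[int]) -> List[List[int]]:
--     s1 = set(nums1)
--     s2 = set(nums2)
--
--     difference = [[], []]
--     for n in nums1:
--         if n not in s2:
--             difference[0].append(n)
--             s2.add(n)
--
--     for n in nums2:
--         if n not in s1:
--             difference[1].append(n)
--             s1.add(n)
--
--     return difference
-- ===== SOURCE B (Python) =====
-- def findDifference(nums1, nums2):
--     # One shared dict: value -> bitmask of which array(s) contain it;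
--     # dict insertion order gives first-occurrence order, one items() scan emits both answers.
--     mask = {}
--     for x in nums1:
--         mask[x] = mask.get(x, 0) | 1
--     for x in nums2:
--         mask[x] = mask.get(x, 0) | 2
--     res = [[], []]
--     for x, m in mask.items():
--         if m == 1:
--             res[0].append(x)
--         elif m == 2:
--             res[1].append(x)
--     return res
-- ===== Notes on version B (the rewrite author's own statement) =====
-- stated objective: alternative
-- what changed: Replaces A's two set-difference stream loops (two sets mutated while appending) with a single presence-bitmask dict built over both arrays and one items() scan that emits both result lists by mask value.
import Mathlib
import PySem

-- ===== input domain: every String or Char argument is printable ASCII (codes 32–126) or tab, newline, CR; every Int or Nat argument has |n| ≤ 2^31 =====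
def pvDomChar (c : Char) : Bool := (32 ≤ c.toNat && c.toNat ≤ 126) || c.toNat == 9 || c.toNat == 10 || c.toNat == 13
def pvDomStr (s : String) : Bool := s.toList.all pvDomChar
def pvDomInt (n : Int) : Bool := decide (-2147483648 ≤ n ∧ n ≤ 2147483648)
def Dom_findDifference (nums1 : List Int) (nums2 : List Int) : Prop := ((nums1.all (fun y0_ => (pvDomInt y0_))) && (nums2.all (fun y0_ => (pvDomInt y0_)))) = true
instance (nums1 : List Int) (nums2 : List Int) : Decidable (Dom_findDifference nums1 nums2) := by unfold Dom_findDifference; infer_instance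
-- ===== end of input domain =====

-- B replaces A's two stream-and-mutate set-difference loops with one shared dict mapping each
-- value to a presence bitmask over both arrays, then emits both result lists in one items() scan.

-- ===== PORT A =====
-- for n in l: if n not in s: difference[i].append(n); s.add(n)   — state (built list, mutated set)
def findDifference (nums1 : List Int) (nums2 : List Int) : List (List Int) :=
  let s1 := PySem.Set.ofList nums1
  let s2 := PySem.Set.ofList nums2
  let st1 := nums1.foldl (fun (st : List Int × PySem.Set Int) n =>
      if PySem.Set.contains st.2 n then st else (st.1 ++ [n], PySem.Set.add st.2 n)) ([], s2)
  let st2 := nums2.foldl (fun (st : List Int × PySem.Set Int) n =>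
      if PySem.Set.contains st.2 n then st else (st.1 ++ [n], PySem.Set.add st.2 n)) ([], s1)
  [st1.1, st2.1]

-- ===== PORT B =====
-- mask[x] = mask.get(x,0) | 1 over nums1, then | 2 over nums2; then one scan of mask.items()
def findDifference_alt (nums1 : List Int) (nums2 : List Int) : List (List Int) :=
  let m1 := nums1.foldl (fun (d : PySem.Dict Int Int) x =>
      d.insert x (PySem.Int.bor (d.getD x 0) 1)) PySem.Dict.empty
  let m2 := nums2.foldl (fun (d : PySem.Dict Int Int) x =>
      d.insert x (PySem.Int.bor (d.getD x 0) 2)) m1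
  let res := m2.items.foldl (fun (r : List Int × List Int) xm =>
      if xm.2 = 1 then (r.1 ++ [xm.1], r.2)
      else if xm.2 = 2 then (r.1, r.2 ++ [xm.1]) else r) ([], [])
  [res.1, res.2]

-- ===== PRECONDITION & SPEC =====
def Spec_findDifference (nums1 : List Int) (nums2 : List Int) (out : List (List Int)) : Prop := out = findDifference_alt nums1 nums2
instance (nums1 : List Int) (nums2 : List Int) (out : List (List Int)) : Decidable (Spec_findDifference nums1 nums2 out) := by unfold Spec_findDifference; infer_instance

-- ===== CLAIM (what is proved, stated in full; the proofs are below) =====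
def Claim_equal_findDifference : Prop := ∀ (nums1 : List Int) (nums2 : List Int), Dom_findDifference nums1 nums2 → Spec_findDifference nums1 nums2 (findDifference nums1 nums2)

-- ===== LEMMAS AND PROOFS =====

-- ---- A side: the loop builds dedup(l) filtered by "not in the other set" ----

def pvNewElems (seen : PySem.Set Int) : List Int → List Int
  | [] => []
  | x :: t => if PySem.Set.contains seen x then pvNewElems seen t
              else x :: pvNewElems (PySem.Set.add seen x) t

lemma contains_eq_true_of_mem {s : PySem.Set Int} {x : Int} (h : x ∈ s) :
    PySem.Set.contains s x = true := (PySem.Set.contains_iff s x).mpr h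

lemma contains_eq_false_of_not_mem {s : PySem.Set Int} {x : Int} (h : x ∉ s) :
    PySem.Set.contains s x = false := by
  rw [Bool.eq_false_iff]; intro hc; exact h ((PySem.Set.contains_iff s x).mp hc)

lemma update_eq_append_newElems (l : List Int) : ∀ (seen : PySem.Set Int),
    PySem.Set.update seen l = seen ++ pvNewElems seen l := by
  induction l with
  | nil => intro seen; simp [pvNewElems, PySem.Set.update]
  | cons x t ih =>
    intro seen
    rw [PySem.Set.update_cons, pvNewElems]
    by_cases h : x ∈ seen
    · rw [contains_eq_true_of_mem h, if_pos rfl, PySem.Set.add_of_mem h, ih seen]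
    · rw [contains_eq_false_of_not_mem h]
      simp only [Bool.false_eq_true, if_false, ih (PySem.Set.add seen x)]
      rw [PySem.Set.add_of_not_mem h, List.append_assoc, List.singleton_append]

lemma newElems_empty_eq_dedup (l : List Int) :
    pvNewElems PySem.Set.empty l = PySem.List.dedup l := by
  have h := update_eq_append_newElems l PySem.Set.empty
  simp only [PySem.Set.empty] at h
  rw [PySem.Set.update_nil_left] at h
  simpa [PySem.List.dedup_eq_ofList] using h.symm

lemma loopA_eq (l : List Int) : ∀ (acc : List Int) (s s2 seen : PySem.Set Int),
    (∀ y, y ∈ s ↔ (y ∈ s2 ∨ y ∈ seen)) →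
    (l.foldl (fun (st : List Int × PySem.Set Int) n =>
        if PySem.Set.contains st.2 n then st else (st.1 ++ [n], PySem.Set.add st.2 n)) (acc, s)).1
      = acc ++ (pvNewElems seen l).filter (fun x => !PySem.Set.contains s2 x) := by
  induction l with
  | nil => intro acc s s2 seen _; simp [pvNewElems]
  | cons x t ih =>
    intro acc s s2 seen hinv
    rw [List.foldl_cons, pvNewElems]
    by_cases hx : x ∈ s
    · rw [contains_eq_true_of_mem hx, if_pos rfl]
      rcases (hinv x).mp hx with h2 | hseen
      · by_cases hsn : x ∈ seen
        · rw [contains_eq_true_of_mem hsn, if_pos rfl]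
          exact ih acc s s2 seen hinv
        · rw [contains_eq_false_of_not_mem hsn]
          simp only [Bool.false_eq_true, if_false, List.filter_cons,
            contains_eq_true_of_mem h2, Bool.not_true]
          rw [ih acc s s2 (PySem.Set.add seen x) (by
            intro y; rw [hinv y, PySem.Set.mem_add]
            constructor
            · rintro (h | h); exacts [Or.inl h, Or.inr (Or.inl h)]
            · rintro (h | h | rfl); exacts [Or.inl h, Or.inr h, Or.inl h2])]
      · rw [contains_eq_true_of_mem hseen, if_pos rfl]
        exact ih acc s s2 seen hinv
    · have h2 : x ∉ s2 := fun h => hx ((hinv x).mpr (Or.inl h))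
      have hsn : x ∉ seen := fun h => hx ((hinv x).mpr (Or.inr h))
      rw [contains_eq_false_of_not_mem hx, contains_eq_false_of_not_mem hsn]
      simp only [Bool.false_eq_true, if_false, List.filter_cons,
        contains_eq_false_of_not_mem h2, Bool.not_false, if_pos]
      rw [ih (acc ++ [x]) (PySem.Set.add s x) s2 (PySem.Set.add seen x) (by
        intro y; rw [PySem.Set.mem_add, PySem.Set.mem_add, hinv y]; tauto)]
      simp

lemma sideA_eq (l1 l2 : List Int) :
    (l1.foldl (fun (st : List Int × PySem.Set Int) n =>
        if PySem.Set.contains st.2 n then st else (st.1 ++ [n], PySem.Set.add st.2 n))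
      ([], PySem.Set.ofList l2)).1
    = (PySem.Set.ofList l1).filter (fun x => !PySem.Set.contains (PySem.Set.ofList l2) x) := by
  rw [loopA_eq l1 [] (PySem.Set.ofList l2) (PySem.Set.ofList l2) PySem.Set.empty
      (by intro y; simp [PySem.Set.empty]), newElems_empty_eq_dedup, List.nil_append,
      PySem.List.dedup_eq_ofList]

-- ---- B side: value of the mask dict at each key ----

lemma getD_pass1 (l : List Int) : ∀ (d : PySem.Dict Int Int),
    (∀ j, d.getD j 0 = 0 ∨ d.getD j 0 = 1) →
    ∀ k, (l.foldl (fun (d : PySem.Dict Int Int) x =>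
        d.insert x (PySem.Int.bor (d.getD x 0) 1)) d).getD k 0
      = if k ∈ l then 1 else d.getD k 0 := by
  induction l with
  | nil => intro d _ k; simp
  | cons x t ih =>
    intro d hv k
    rw [List.foldl_cons]
    have hval : PySem.Int.bor (d.getD x 0) 1 = 1 := by
      rcases hv x with h | h <;> rw [h] <;> decide
    have hv' : ∀ j, (d.insert x (PySem.Int.bor (d.getD x 0) 1)).getD j 0 = 0 ∨
        (d.insert x (PySem.Int.bor (d.getD x 0) 1)).getD j 0 = 1 := by
      intro j; rw [PySem.Dict.getD_insert]
      split_ifs with h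
      · exact Or.inr hval
      · exact hv j
    rw [ih _ hv' k, PySem.Dict.getD_insert, hval]
    by_cases hkt : k ∈ t <;> by_cases hkx : k = x <;>
      simp [hkt, hkx, List.mem_cons]

lemma getD_pass2 (l : List Int) : ∀ (d : PySem.Dict Int Int),
    (∀ j, d.getD j 0 = 0 ∨ d.getD j 0 = 1 ∨ d.getD j 0 = 2 ∨ d.getD j 0 = 3) →
    ∀ k, (l.foldl (fun (d : PySem.Dict Int Int) x =>
        d.insert x (PySem.Int.bor (d.getD x 0) 2)) d).getD k 0
      = if k ∈ l then PySem.Int.bor (d.getD k 0) 2 else d.getD k 0 := by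
  induction l with
  | nil => intro d _ k; simp
  | cons x t ih =>
    intro d hv k
    rw [List.foldl_cons]
    have hv' : ∀ j, (d.insert x (PySem.Int.bor (d.getD x 0) 2)).getD j 0 = 0 ∨
        (d.insert x (PySem.Int.bor (d.getD x 0) 2)).getD j 0 = 1 ∨
        (d.insert x (PySem.Int.bor (d.getD x 0) 2)).getD j 0 = 2 ∨
        (d.insert x (PySem.Int.bor (d.getD x 0) 2)).getD j 0 = 3 := by
      intro j; rw [PySem.Dict.getD_insert]
      split_ifs with h
      · rcases hv x with h0 | h0 | h0 | h0 <;> rw [h0] <;> decide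
      · exact hv j
    rw [ih _ hv' k, PySem.Dict.getD_insert]
    have hidem : PySem.Int.bor (PySem.Int.bor (d.getD x 0) 2) 2
        = PySem.Int.bor (d.getD x 0) 2 := by
      rcases hv x with h0 | h0 | h0 | h0 <;> rw [h0] <;> decide
    by_cases hkt : k ∈ t <;> by_cases hkx : k = x <;>
      simp [hkt, hkx, List.mem_cons, hidem]

-- ---- B side: the items() scan is two filters ----

lemma outfold (its : List (Int × Int)) : ∀ (r1 r2 : List Int),
    its.foldl (fun (r : List Int × List Int) xm =>
        if xm.2 = 1 then (r.1 ++ [xm.1], r.2)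
        else if xm.2 = 2 then (r.1, r.2 ++ [xm.1]) else r) (r1, r2)
      = (r1 ++ (its.filter (fun p => p.2 = 1)).map (·.1),
         r2 ++ (its.filter (fun p => p.2 = 2)).map (·.1)) := by
  induction its with
  | nil => simp
  | cons p t ih =>
    intro r1 r2
    rw [List.foldl_cons]
    by_cases h1 : p.2 = 1
    · have h2 : ¬ p.2 = 2 := by omega
      simp [h1, ih]
    · by_cases h2 : p.2 = 2
      · simp [h2, ih]
      · simp [h1, h2, ih]

theorem findDifference_eq (nums1 nums2 : List Int) :
    findDifference nums1 nums2 = findDifference_alt nums1 nums2 := by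
  unfold findDifference findDifference_alt
  dsimp only
  have hv1 : ∀ j, (PySem.Dict.empty : PySem.Dict Int Int).getD j 0 = 0 ∨
      (PySem.Dict.empty : PySem.Dict Int Int).getD j 0 = 1 := by
    intro j; left; simp
  set m1 := nums1.foldl (fun (d : PySem.Dict Int Int) x =>
      d.insert x (PySem.Int.bor (d.getD x 0) 1)) PySem.Dict.empty with hm1
  set m2 := nums2.foldl (fun (d : PySem.Dict Int Int) x =>
      d.insert x (PySem.Int.bor (d.getD x 0) 2)) m1 with hm2
  have hget1 : ∀ k, m1.getD k 0 = if k ∈ nums1 then 1 else 0 := by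
    intro k; rw [hm1, getD_pass1 nums1 _ hv1 k]; simp
  have hv1' : ∀ j, m1.getD j 0 = 0 ∨ m1.getD j 0 = 1 ∨ m1.getD j 0 = 2 ∨ m1.getD j 0 = 3 := by
    intro j; rw [hget1 j]; split_ifs <;> simp
  have hget2 : ∀ k, m2.getD k 0
      = if k ∈ nums2 then PySem.Int.bor (if k ∈ nums1 then 1 else 0) 2
        else if k ∈ nums1 then 1 else 0 := by
    intro k; rw [hm2, getD_pass2 nums2 _ hv1' k, hget1 k]
  have hnd1 : m1.keys.Nodup := by
    rw [hm1]; exact PySem.Dict.nodup_keys_foldl_insert _ _ _ (by simp)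
  have hnd2 : m2.keys.Nodup := by
    rw [hm2]; exact PySem.Dict.nodup_keys_foldl_insert _ _ _ hnd1
  have hk1 : m1.keys = PySem.Set.ofList nums1 := by
    rw [hm1, PySem.Dict.keys_foldl_insert]
    simp [PySem.Set.update_nil_left]
  have hk2 : m2.keys = PySem.Set.ofList nums1
      ++ (PySem.Set.ofList nums2).filter (fun y => !PySem.Set.contains (PySem.Set.ofList nums1) y) := by
    rw [hm2, PySem.Dict.keys_foldl_insert, hk1, PySem.Set.update_eq_append_filter]
  have hitems : m2.items = m2.keys.map (fun k => (k, m2.getD k 0)) :=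
    PySem.Dict.items_eq_map_keys m2 hnd2 0
  rw [outfold, hitems, hk2, sideA_eq nums1 nums2, sideA_eq nums2 nums1]
  have hid : ((fun (x : Int × Int) => x.1) ∘ fun k => (k, m2.getD k 0)) = id := rfl
  simp only [List.nil_append, List.filter_map, List.map_map, List.map_append,
    List.filter_append, hid, List.map_id]
  congr 1
  · -- first result list
    have hB2 : List.filter ((fun (p : Int × Int) => decide (p.2 = 1)) ∘ fun k => (k, m2.getD k 0))
        (List.filter (fun y => !PySem.Set.contains (PySem.Set.ofList nums1) y) (PySem.Set.ofList nums2)) = [] := by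
      rw [List.filter_eq_nil_iff]
      intro a ha hc
      rw [List.mem_filter] at ha
      have ha2 : a ∈ nums2 := (PySem.Set.mem_ofList nums2 a).mp ha.1
      have ha1 : a ∉ nums1 := by
        intro h
        have h2 := ha.2
        rw [contains_eq_true_of_mem ((PySem.Set.mem_ofList nums1 a).mpr h)] at h2
        simp at h2
      have hg := hget2 a
      rw [if_pos ha2, if_neg ha1] at hg
      simp only [Function.comp] at hc
      simp only [hg] at hc
      exact absurd (of_decide_eq_true hc) (by decide)
    rw [hB2, List.append_nil]
    apply List.filter_congr
    intro x hx
    have hx1 : x ∈ nums1 := (PySem.Set.mem_ofList nums1 x).mp hx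
    have hg := hget2 x
    by_cases h2 : x ∈ nums2
    · rw [if_pos h2, if_pos hx1] at hg
      rw [contains_eq_true_of_mem ((PySem.Set.mem_ofList nums2 x).mpr h2)]
      simp only [Function.comp, hg]
      decide
    · rw [if_neg h2, if_pos hx1] at hg
      rw [contains_eq_false_of_not_mem (fun h => h2 ((PySem.Set.mem_ofList nums2 x).mp h))]
      simp only [Function.comp, hg]
      decide
  · -- second result list
    have hA2 : List.filter ((fun (p : Int × Int) => decide (p.2 = 2)) ∘ fun k => (k, m2.getD k 0))
        (PySem.Set.ofList nums1) = [] := by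
      rw [List.filter_eq_nil_iff]
      intro a ha hc
      have ha1 : a ∈ nums1 := (PySem.Set.mem_ofList nums1 a).mp ha
      have hg := hget2 a
      simp only [Function.comp] at hc
      by_cases h2 : a ∈ nums2
      · rw [if_pos h2, if_pos ha1] at hg
        simp only [hg] at hc
        exact absurd (of_decide_eq_true hc) (by decide)
      · rw [if_neg h2, if_pos ha1] at hg
        simp only [hg] at hc
        exact absurd (of_decide_eq_true hc) (by decide)
    have hall : List.filter ((fun (p : Int × Int) => decide (p.2 = 2)) ∘ fun k => (k, m2.getD k 0))
        (List.filter (fun y => !PySem.Set.contains (PySem.Set.ofList nums1) y) (PySem.Set.ofList nums2))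
        = List.filter (fun y => !PySem.Set.contains (PySem.Set.ofList nums1) y) (PySem.Set.ofList nums2) := by
      rw [List.filter_eq_self]
      intro a ha
      rw [List.mem_filter] at ha
      have ha2 : a ∈ nums2 := (PySem.Set.mem_ofList nums2 a).mp ha.1
      have ha1 : a ∉ nums1 := by
        intro h
        have h2 := ha.2
        rw [contains_eq_true_of_mem ((PySem.Set.mem_ofList nums1 a).mpr h)] at h2
        simp at h2
      have hg := hget2 a
      rw [if_pos ha2, if_neg ha1] at hg
      simp only [Function.comp, hg]
      decide
    rw [hA2, List.nil_append, hall]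

-- ===== VERDICT (by name: the statement is the Claim_ definition above) =====
theorem findDifference_spec : Claim_equal_findDifference := by
  intro nums1 nums2 _
  unfold Spec_findDifference
  exact findDifference_eq nums1 nums2
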